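-- pv_equiv track=rewrite | github.com/jvuorinen/aoc-2021 | 2023/day_17.py | get_consecutive
-- ===== SOURCE A (Python) =====
-- def get_consecutive(path):
--     c = 0
--     d = path[-1] - path[-2]
--     for i in range(1, len(path)):
--         if path[-i] - path[-i - 1] == d:
--             c += 1
--         else:
--             break
--     return c
-- ===== SOURCE B (Python) =====
-- def get_consecutive(path):
--     run = 0
--     prev = None
--     for a, b in zip(path, path[1:]):
--         d = b - a
--         run = run + 1 if d == prev else 1
--         prev = d
--     return run
-- ===== Notes on version B (the rewrite author's own statement) =====
-- stated objective: simpler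
-- what changed: B replaces the end-anchored negative-index loop with a break by a single forward pass over adjacent pairs that maintains the current run length of equal deltas, whose final value is the trailing run.
-- outside the precondition, e.g. on get_consecutive([-2]): A raises IndexError, B returns 0
import Mathlib
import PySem

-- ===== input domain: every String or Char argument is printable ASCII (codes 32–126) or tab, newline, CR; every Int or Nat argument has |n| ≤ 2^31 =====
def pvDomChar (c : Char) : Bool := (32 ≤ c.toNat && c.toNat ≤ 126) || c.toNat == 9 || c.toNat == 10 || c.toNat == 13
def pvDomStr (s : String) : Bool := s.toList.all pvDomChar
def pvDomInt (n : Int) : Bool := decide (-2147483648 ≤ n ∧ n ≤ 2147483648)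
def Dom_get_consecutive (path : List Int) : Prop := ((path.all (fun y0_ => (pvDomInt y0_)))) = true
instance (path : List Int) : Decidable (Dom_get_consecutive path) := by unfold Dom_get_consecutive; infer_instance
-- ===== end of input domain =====

-- B replaces A's end-anchored negative-index loop (with break) by one forward pass over
-- adjacent pairs maintaining the current run of equal deltas; objective: simpler.

-- ===== PORT A =====
-- the 'for i in range(1, len(path))' loop with its break; pyGet? none = IndexError,
-- unreachable for 1 ≤ i ≤ len-1 on paths admitted by Pre_ (the loop then stops, like the raise would end it)
def getconsLoop (path : List Int) (d : Int) : List Int → Int → Int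
  | [], c => c
  | i :: rest, c =>
    match PySem.List.pyGet? path (-i), PySem.List.pyGet? path (-i - 1) with
    | some x, some y => if x - y = d then getconsLoop path d rest (c + 1) else c
    | _, _ => c

def get_consecutive (path : List Int) : Int :=
  match PySem.List.pyGet? path (-1), PySem.List.pyGet? path (-2) with
  | some a, some b => getconsLoop path (a - b) (PySem.List.pyRange 1 (path.length : Int) 1) 0
  | _, _ => 0  -- IndexError: excluded by Pre_

-- ===== PORT B =====
def get_consecutive_alt (path : List Int) : Int :=
  ((path.zip (PySem.List.slice path (some 1) none)).foldl
    (fun (st : Int × Option Int) p =>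
      let d := p.2 - p.1
      (if st.2 = some d then st.1 + 1 else 1, some d))
    (0, none)).1

-- ===== PRECONDITION & SPEC =====
-- A raises IndexError on path[-2] when the path has fewer than two points
def Pre_get_consecutive (path : List Int) : Prop := 2 ≤ path.length
instance (path : List Int) : Decidable (Pre_get_consecutive path) := by unfold Pre_get_consecutive; infer_instance
def pvWitness_get_consecutive : List Int := [0, 1, 2, 4]

def Spec_get_consecutive (path : List Int) (out : Int) : Prop := out = get_consecutive_alt path
instance (path : List Int) (out : Int) : Decidable (Spec_get_consecutive path out) := by unfold Spec_get_consecutive; infer_instance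

-- ===== CLAIM (what is proved, stated in full; the proofs are below) =====
def Claim_equal_get_consecutive : Prop := ∀ (path : List Int), Dom_get_consecutive path → Pre_get_consecutive path → Spec_get_consecutive path (get_consecutive path)

-- ===== LEMMAS AND PROOFS =====

-- length of the matching prefix: what A's break-loop counts over the reversed delta list
def refRun (d : Int) : List Int → Int
  | [] => 0
  | x :: xs => if x = d then 1 + refRun d xs else 0

-- trailing run of equal values
def tailRun (l : List Int) : Int :=
  match l.reverse with
  | [] => 0
  | x :: xs => 1 + refRun x xs

def stepB (st : Int × Option Int) (d : Int) : Int × Option Int :=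
  (if st.2 = some d then st.1 + 1 else 1, some d)

-- the list of consecutive differences of path, in forward order
def zwd (path : List Int) : List Int := List.zipWith (fun a b => b - a) path path.tail

lemma zwd_length (path : List Int) : (zwd path).length = path.length - 1 := by
  simp [zwd, List.length_zipWith]

lemma zwd_getElem (path : List Int) (j : Nat) (hj : j < (zwd path).length) :
    (zwd path)[j] = path[j+1]'(by simp [zwd_length] at hj; omega)
      - path[j]'(by simp [zwd_length] at hj; omega) := by
  simp only [zwd, List.getElem_zipWith]
  congr 1
  exact List.getElem_tail _

lemma foldl_stepB (ds : List Int) :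
    ds.foldl stepB (0, none) = (tailRun ds, ds.getLast?) := by
  induction ds using List.reverseRecOn with
  | nil => simp [tailRun]
  | append_singleton ds x ih =>
    rw [List.foldl_append, ih]
    simp only [List.foldl, stepB, tailRun, List.reverse_append, List.reverse_cons,
      List.reverse_nil, List.nil_append, List.cons_append, List.getLast?_concat]
    rcases h : ds.reverse with _ | ⟨y, ys⟩
    · have : ds = [] := by simpa using congrArg List.reverse h
      subst this; simp [refRun]
    · have hlast : ds.getLast? = some y := by
        rw [List.getLast?_eq_head?_reverse, h]; rfl
      rw [hlast]
      simp only [refRun, Option.some.injEq]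
      by_cases hyx : y = x
      · subst hyx; simp; omega
      · simp [hyx]

lemma alt_eq_tailRun (path : List Int) :
    get_consecutive_alt path = tailRun (zwd path) := by
  unfold get_consecutive_alt
  rw [PySem.List.slice_from_one]
  have hmap : (path.zip path.tail).map (fun p => p.2 - p.1) = zwd path := by
    rw [List.zip_eq_zipWith, List.map_zipWith]; rfl
  have : (path.zip path.tail).foldl
      (fun (st : Int × Option Int) p =>
        (if st.2 = some (p.2 - p.1) then st.1 + 1 else 1, some (p.2 - p.1)))
      (0, none)
      = ((path.zip path.tail).map (fun p => p.2 - p.1)).foldl stepB (0, none) := by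
    rw [List.foldl_map]; rfl
  rw [this, hmap, foldl_stepB]

lemma loopA (path : List Int) (d : Int) :
    ∀ (m k : Nat), k + m = path.length → 1 ≤ k → ∀ c : Int,
    getconsLoop path d (PySem.List.pyRange (k : Int) (path.length : Int) 1) c
      = c + refRun d ((zwd path).reverse.drop (k - 1)) := by
  intro m
  induction m with
  | zero =>
    intro k hk hk1 c
    rw [PySem.List.pyRange_one_eq_nil (by omega)]
    rw [List.drop_eq_nil_of_le (by simp [zwd_length]; omega)]
    simp [getconsLoop, refRun]
  | succ m ih =>
    intro k hk hk1 c
    have hn : k < path.length := by omega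
    rw [PySem.List.pyRange_one_cons (by exact_mod_cast hn)]
    have h1 : PySem.List.pyGet? path (-(k : Int)) = some path[path.length - k] := by
      rw [PySem.List.pyGet?_neg_natCast path k (by omega) (by omega)]
      exact List.getElem?_eq_getElem (by omega)
    have h2 : PySem.List.pyGet? path (-(k : Int) - 1) = some path[path.length - (k+1)] := by
      have hc : (-(k : Int) - 1) = -((k+1 : Nat) : Int) := by push_cast; ring
      rw [hc, PySem.List.pyGet?_neg_natCast path (k+1) (by omega) (by omega)]
      exact List.getElem?_eq_getElem (by omega)
    have hkk : k - 1 < (zwd path).reverse.length := by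
      rw [List.length_reverse, zwd_length]; omega
    have hidx : ((zwd path).reverse)[k-1]'hkk
        = path[path.length - k] - path[path.length - (k+1)] := by
      rw [List.getElem_reverse, zwd_getElem]
      congr 1
      · congr 1; simp [zwd_length]; omega
      · congr 1; simp [zwd_length]; omega
    have hdrop : (zwd path).reverse.drop (k - 1)
        = (path[path.length - k] - path[path.length - (k+1)])
          :: (zwd path).reverse.drop k := by
      have hsucc : k - 1 + 1 = k := by omega
      rw [List.drop_eq_getElem_cons hkk, hidx, hsucc]
    show getconsLoop path d ((k : Int) :: PySem.List.pyRange ((k : Int) + 1) (path.length : Int) 1) c = _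
    simp only [getconsLoop, h1, h2]
    rw [hdrop]
    by_cases hcond : path[path.length - k] - path[path.length - (k+1)] = d
    · rw [if_pos hcond]
      have hc : ((k : Int) + 1) = ((k + 1 : Nat) : Int) := by push_cast; ring
      rw [hc, ih (k+1) (by omega) (by omega) (c+1)]
      simp only [refRun, if_pos hcond]
      have hc2 : (k + 1) - 1 = k := by omega
      rw [hc2]; ring
    · rw [if_neg hcond]
      simp only [refRun, if_neg hcond]
      ring

lemma a_eq_tailRun (path : List Int) (hpre : 2 ≤ path.length) :
    get_consecutive path = tailRun (zwd path) := by
  have h1 : PySem.List.pyGet? path (-1) = some path[path.length - 1] := by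
    rw [show (-1 : Int) = -((1 : Nat) : Int) by norm_num,
        PySem.List.pyGet?_neg_natCast path 1 (by omega) (by omega)]
    exact List.getElem?_eq_getElem (by omega)
  have h2 : PySem.List.pyGet? path (-2) = some path[path.length - 2] := by
    rw [show (-2 : Int) = -((2 : Nat) : Int) by norm_num,
        PySem.List.pyGet?_neg_natCast path 2 (by omega) (by omega)]
    exact List.getElem?_eq_getElem (by omega)
  unfold get_consecutive
  rw [h1, h2]
  show getconsLoop path (path[path.length - 1] - path[path.length - 2])
      (PySem.List.pyRange ((1 : Nat) : Int) (path.length : Int) 1) 0 = _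
  rw [loopA path _ (path.length - 1) 1 (by omega) (by omega) 0]
  have h0 : 0 < (zwd path).reverse.length := by rw [List.length_reverse, zwd_length]; omega
  have hd0 : (zwd path).reverse = ((zwd path).reverse)[0]'h0 :: (zwd path).reverse.drop 1 := by
    have := List.drop_eq_getElem_cons h0
    simpa using this
  have hval : ((zwd path).reverse)[0]'h0 = path[path.length - 1] - path[path.length - 2] := by
    rw [List.getElem_reverse, zwd_getElem]
    congr 1
    · congr 1; simp [zwd_length]; omega
    · congr 1; simp [zwd_length]; omega
  rw [show (1 : Nat) - 1 = 0 from rfl, List.drop_zero]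
  conv_lhs => rw [hd0, hval]
  unfold tailRun
  rw [hd0, hval]
  simp [refRun]

-- ===== VERDICT (by name: the statement is the Claim_ definition above) =====
theorem get_consecutive_spec : Claim_equal_get_consecutive := by
  intro path _ hpre
  unfold Spec_get_consecutive
  rw [a_eq_tailRun path hpre, alt_eq_tailRun]
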